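-- pv_equiv track=rewrite | github.com/KseniaTorgud/astrologi | app.py | zodiac_sign
-- ===== SOURCE A (Python) =====
-- def zodiac_sign(day, month):
--     zodiac = [
--         ((3, 21), (4, 19), "Овен"),
--         ((4, 20), (5, 20), "Телец"),
--         ((5, 21), (6, 20), "Близнецы"),
--         ((6, 21), (7, 22), "Рак"),
--         ((7, 23), (8, 22), "Лев"),
--         ((8, 23), (9, 22), "Дева"),
--         ((9, 23), (10, 22), "Весы"),
--         ((10, 23), (11, 21), "Скорпион"),
--         ((11, 22), (12, 21), "Стрелец"),
--         ((12, 22), (1, 19), "Козерог"),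
--         ((1, 20), (2, 18), "Водолей"),
--         ((2, 19), (3, 20), "Рыбы")
--     ]
--
--     for start, end, sign in zodiac:
--         (s_m, s_d), (e_m, e_d) = start, end
--         if (month == s_m and day >= s_d) or (month == e_m and day <= e_d):
--             return sign
--     return None
-- ===== SOURCE B (Python) =====
-- SIGNS = ["Козерог", "Водолей", "Рыбы", "Овен", "Телец", "Близнецы",
--          "Рак", "Лев", "Дева", "Весы", "Скорпион", "Стрелец"]
-- # CUTOFF[m-1] = last day of month m that still belongs to the previous sign
-- CUTOFF = [19, 18, 20, 19, 20, 20, 22, 22, 22, 22, 21, 21]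
--
-- def zodiac_sign(day, month):
--     if not (1 <= month <= 12):
--         return None
--     idx = month - 1 if day <= CUTOFF[month - 1] else month % 12
--     return SIGNS[idx]
-- ===== Notes on version B (the rewrite author's own statement) =====
-- stated objective: idiomatic
-- what changed: Replaces the 12-row interval scan with direct table lookup: two parallel constant arrays (sign per month, cutoff day per month) and one index computation idx = month-1 if day <= cutoff[month-1] else month % 12.
import Mathlib
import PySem

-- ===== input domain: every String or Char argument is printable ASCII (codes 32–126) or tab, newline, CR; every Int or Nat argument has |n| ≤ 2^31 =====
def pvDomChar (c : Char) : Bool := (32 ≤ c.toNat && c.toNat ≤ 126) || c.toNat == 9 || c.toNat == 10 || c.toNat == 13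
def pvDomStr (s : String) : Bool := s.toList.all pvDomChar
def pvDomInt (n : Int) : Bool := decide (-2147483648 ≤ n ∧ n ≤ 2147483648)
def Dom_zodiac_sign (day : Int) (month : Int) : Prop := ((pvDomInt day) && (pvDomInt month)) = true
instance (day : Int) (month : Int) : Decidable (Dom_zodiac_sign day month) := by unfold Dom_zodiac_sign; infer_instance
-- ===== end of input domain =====

-- B replaces A's 12-row interval scan by two parallel month-indexed constant tables and
-- one direct index computation (more idiomatic; same cost in practice).

-- ===== PORT A =====
-- A's zodiac table: (start (m,d), end (m,d), sign)
def zodiacTable : List ((Int × Int) × (Int × Int) × String) :=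
  [ ((3, 21), (4, 19), "Овен"),
    ((4, 20), (5, 20), "Телец"),
    ((5, 21), (6, 20), "Близнецы"),
    ((6, 21), (7, 22), "Рак"),
    ((7, 23), (8, 22), "Лев"),
    ((8, 23), (9, 22), "Дева"),
    ((9, 23), (10, 22), "Весы"),
    ((10, 23), (11, 21), "Скорпион"),
    ((11, 22), (12, 21), "Стрелец"),
    ((12, 22), (1, 19), "Козерог"),
    ((1, 20), (2, 18), "Водолей"),
    ((2, 19), (3, 20), "Рыбы") ]

-- the for-loop: return the sign of the first matching row, else None
def zodiacLoop (day month : Int) : List ((Int × Int) × (Int × Int) × String) → Option String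
  | [] => none
  | ((sm, sd), (em, ed), sign) :: rest =>
      if (month = sm ∧ day ≥ sd) ∨ (month = em ∧ day ≤ ed) then some sign
      else zodiacLoop day month rest

def zodiac_sign (day : Int) (month : Int) : Option String :=
  zodiacLoop day month zodiacTable

-- ===== PORT B =====
def signsB : List String :=
  ["Козерог", "Водолей", "Рыбы", "Овен", "Телец", "Близнецы",
   "Рак", "Лев", "Дева", "Весы", "Скорпион", "Стрелец"]

-- CUTOFF[m-1] = last day of month m still belonging to the previous sign
def cutoffB : List Int := [19, 18, 20, 19, 20, 20, 22, 22, 22, 22, 21, 21]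

def zodiac_sign_alt (day : Int) (month : Int) : Option String :=
  if 1 ≤ month ∧ month ≤ 12 then
    let idx : Int :=
      if day ≤ (PySem.List.pyGet? cutoffB (month - 1)).getD 0 then month - 1
      else PySem.Int.mod month 12
    PySem.List.pyGet? signsB idx
  else none

-- ===== PRECONDITION & SPEC =====
def Spec_zodiac_sign (day : Int) (month : Int) (out : Option String) : Prop := out = zodiac_sign_alt day month
instance (day : Int) (month : Int) (out : Option String) : Decidable (Spec_zodiac_sign day month out) := by unfold Spec_zodiac_sign; infer_instance

-- ===== CLAIM (what is proved, stated in full; the proofs are below) =====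
def Claim_equal_zodiac_sign : Prop := ∀ (day : Int) (month : Int), Dom_zodiac_sign day month → Spec_zodiac_sign day month (zodiac_sign day month)

-- ===== LEMMAS AND PROOFS =====
theorem zodiac_eq (day month : Int) : zodiac_sign day month = zodiac_sign_alt day month := by
  by_cases h : 1 ≤ month ∧ month ≤ 12
  · obtain ⟨h1, h2⟩ := h
    interval_cases month <;>
      simp [zodiac_sign, zodiac_sign_alt, zodiacLoop, zodiacTable, signsB, cutoffB,
            PySem.List.pyGet?, PySem.List.pyIdx?, PySem.Int.mod] <;>
      split_ifs <;> first | rfl | omega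
  · have h1 : month ≠ 1 := by omega
    have h2 : month ≠ 2 := by omega
    have h3 : month ≠ 3 := by omega
    have h4 : month ≠ 4 := by omega
    have h5 : month ≠ 5 := by omega
    have h6 : month ≠ 6 := by omega
    have h7 : month ≠ 7 := by omega
    have h8 : month ≠ 8 := by omega
    have h9 : month ≠ 9 := by omega
    have h10 : month ≠ 10 := by omega
    have h11 : month ≠ 11 := by omega
    have h12 : month ≠ 12 := by omega
    simp [zodiac_sign, zodiac_sign_alt, zodiacLoop, zodiacTable, h,
          h1, h2, h3, h4, h5, h6, h7, h8, h9, h10, h11, h12]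

-- ===== VERDICT (by name: the statement is the Claim_ definition above) =====
theorem zodiac_sign_spec : Claim_equal_zodiac_sign := by
  intro day month _
  unfold Spec_zodiac_sign
  exact zodiac_eq day month
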